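-- pv_equiv track=rewrite | github.com/Custom-Devin-Demos/etl-pipeline-demo | src/domain_learner/knowledge_base.py | _build_glossary
-- ===== SOURCE A (Python) =====
-- from typing import Any
--
-- def _build_glossary(entities: dict[str, Any]) -> dict[str, str]:
--     glossary: dict[str, str] = {}
--
--     term_definitions = {
--         "customer_id": "Unique identifier for a customer entity",
--         "product_id": "Unique identifier for a product in the catalog",
--         "transaction_id": "Unique identifier for a business transaction",
--         "order_id": "Unique identifier for a purchase order",
--         "quantity": "Number of units involved in a transaction",
--         "unit_price": "Price per single unit of a product",
--         "total_amount": "Calculated total value of a transaction",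
--         "email": "Electronic mail address for communication",
--         "phone": "Telephone contact number",
--         "registration_date": "Date when the entity was first registered",
--         "loyalty_tier": "Customer loyalty program classification level",
--         "payment_method": "Method of payment used for transaction",
--         "status": "Current state or condition of the record",
--         "category": "Classification group for products",
--         "brand": "Product manufacturer or brand name",
--         "supplier_id": "Unique identifier for a supplier entity",
--         "warehouse_id": "Unique identifier for a storage facility",
--         "sku": "Stock Keeping Unit - unique product variant identifier",
--         "reorder_point": "Minimum inventory level triggering restocking",
--         "tracking_number": "Shipment tracking reference number",
--         "carrier": "Shipping or logistics provider company",
--         "refund_amount": "Monetary value returned to customer",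
--         "return_date": "Date when product was returned",
--     }
--
--     all_cols = set()
--     for entity in entities.values():
--         all_cols.update(entity.get("attributes", {}).keys())
--
--     for col in all_cols:
--         col_lower = col.lower()
--         for term, definition in term_definitions.items():
--             if term in col_lower:
--                 glossary[col] = definition
--                 break
--
--     return glossary
-- ===== SOURCE B (Python) =====
-- from typing import Any
--
-- _TERM_DEFINITIONS = {
--     "customer_id": "Unique identifier for a customer entity",
--     "product_id": "Unique identifier for a product in the catalog",
--     "transaction_id": "Unique identifier for a business transaction",
--     "order_id": "Unique identifier for a purchase order",
--     "quantity": "Number of units involved in a transaction",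
--     "unit_price": "Price per single unit of a product",
--     "total_amount": "Calculated total value of a transaction",
--     "email": "Electronic mail address for communication",
--     "phone": "Telephone contact number",
--     "registration_date": "Date when the entity was first registered",
--     "loyalty_tier": "Customer loyalty program classification level",
--     "payment_method": "Method of payment used for transaction",
--     "status": "Current state or condition of the record",
--     "category": "Classification group for products",
--     "brand": "Product manufacturer or brand name",
--     "supplier_id": "Unique identifier for a supplier entity",
--     "warehouse_id": "Unique identifier for a storage facility",
--     "sku": "Stock Keeping Unit - unique product variant identifier",
--     "reorder_point": "Minimum inventory level triggering restocking",
--     "tracking_number": "Shipment tracking reference number",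
--     "carrier": "Shipping or logistics provider company",
--     "refund_amount": "Monetary value returned to customer",
--     "return_date": "Date when product was returned",
-- }
--
--
-- def _build_glossary(entities: dict[str, Any]) -> dict[str, str]:
--     # Term-major pass (inverted loops): for each term, sweep the column set and
--     # record the definition with setdefault, so the FIRST term in table order
--     # wins for every column; a final pass re-keys the result in column order.
--     all_cols = set()
--     for entity in entities.values():
--         all_cols.update(entity.get("attributes", {}).keys())
--
--     matched: dict[str, str] = {}
--     for term, definition in _TERM_DEFINITIONS.items():
--         for col in all_cols:
--             if term in col.lower():
--                 matched.setdefault(col, definition)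
--
--     return {col: matched[col] for col in all_cols if col in matched}
-- ===== Notes on version B (the rewrite author's own statement) =====
-- stated objective: alternative
-- what changed: B inverts A's nested loops: it sweeps the term table as the OUTER loop and the column set as the inner one, recording matches with setdefault so the first term in table order wins, then re-keys the matches in column order with a final comprehension; A instead scans the term table per column with a break.
import Mathlib
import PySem

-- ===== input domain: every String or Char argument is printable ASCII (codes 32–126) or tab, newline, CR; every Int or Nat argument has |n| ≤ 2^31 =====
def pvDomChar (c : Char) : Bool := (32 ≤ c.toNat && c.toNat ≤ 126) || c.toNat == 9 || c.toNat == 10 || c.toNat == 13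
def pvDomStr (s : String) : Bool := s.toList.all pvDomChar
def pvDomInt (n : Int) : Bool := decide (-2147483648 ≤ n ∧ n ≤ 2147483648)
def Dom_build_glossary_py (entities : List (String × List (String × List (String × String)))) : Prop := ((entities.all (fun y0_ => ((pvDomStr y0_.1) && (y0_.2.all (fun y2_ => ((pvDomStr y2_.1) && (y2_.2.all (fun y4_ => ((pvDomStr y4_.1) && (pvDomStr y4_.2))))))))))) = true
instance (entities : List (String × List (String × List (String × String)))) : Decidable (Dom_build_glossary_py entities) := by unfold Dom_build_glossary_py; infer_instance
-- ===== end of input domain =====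

-- B inverts A's nested loops: term-major sweep with setdefault, then a re-keying pass
-- in column order; return value only, no observable mutation. The output dict's order
-- in Python depends on set iteration order; both ports use PySem.Set's first-insertion
-- order, under which the orders coincide.

-- the term_definitions table (shared data literal of both Pythons)
def pvTermDefs : List (String × String) := [
  ("customer_id", "Unique identifier for a customer entity"),
  ("product_id", "Unique identifier for a product in the catalog"),
  ("transaction_id", "Unique identifier for a business transaction"),
  ("order_id", "Unique identifier for a purchase order"),
  ("quantity", "Number of units involved in a transaction"),
  ("unit_price", "Price per single unit of a product"),
  ("total_amount", "Calculated total value of a transaction"),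
  ("email", "Electronic mail address for communication"),
  ("phone", "Telephone contact number"),
  ("registration_date", "Date when the entity was first registered"),
  ("loyalty_tier", "Customer loyalty program classification level"),
  ("payment_method", "Method of payment used for transaction"),
  ("status", "Current state or condition of the record"),
  ("category", "Classification group for products"),
  ("brand", "Product manufacturer or brand name"),
  ("supplier_id", "Unique identifier for a supplier entity"),
  ("warehouse_id", "Unique identifier for a storage facility"),
  ("sku", "Stock Keeping Unit - unique product variant identifier"),
  ("reorder_point", "Minimum inventory level triggering restocking"),
  ("tracking_number", "Shipment tracking reference number"),
  ("carrier", "Shipping or logistics provider company"),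
  ("refund_amount", "Monetary value returned to customer"),
  ("return_date", "Date when product was returned")]

-- ===== PORT A =====
-- inner loop of A: 'for term, definition in term_definitions.items(): if term in col_lower: glossary[col] = definition; break'
def pvMatchLoop (glossary : PySem.Dict String String) (col col_lower : String) :
    List (String × String) → PySem.Dict String String
  | [] => glossary
  | (term, definition) :: rest =>
    if PySem.Str.isIn term col_lower then glossary.insert col definition
    else pvMatchLoop glossary col col_lower rest

def build_glossary_py (entities : List (String × List (String × List (String × String)))) : List (String × String) :=
  let all_cols : PySem.Set String :=
    (PySem.Dict.ofList entities).values.foldl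
      (fun s entity =>
        PySem.Set.update s (PySem.Dict.ofList ((PySem.Dict.ofList entity).getD "attributes" [])).keys)
      PySem.Set.empty
  (all_cols.foldl
    (fun glossary col => pvMatchLoop glossary col (PySem.Str.lower col) pvTermDefs)
    PySem.Dict.empty).items

-- ===== PORT B =====
def build_glossary_py_alt (entities : List (String × List (String × List (String × String)))) : List (String × String) :=
  let all_cols : PySem.Set String :=
    (PySem.Dict.ofList entities).values.foldl
      (fun s entity =>
        PySem.Set.update s (PySem.Dict.ofList ((PySem.Dict.ofList entity).getD "attributes" [])).keys)
      PySem.Set.empty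
  -- 'for term, definition in _TERM_DEFINITIONS.items(): for col in all_cols: if term in col.lower(): matched.setdefault(col, definition)'
  let matched : PySem.Dict String String :=
    pvTermDefs.foldl
      (fun matched td =>
        all_cols.foldl
          (fun matched col =>
            if PySem.Str.isIn td.1 (PySem.Str.lower col) then matched.setdefault col td.2
            else matched)
          matched)
      PySem.Dict.empty
  -- '{col: matched[col] for col in all_cols if col in matched}'
  (all_cols.foldl
    (fun g col =>
      match matched.get? col with
      | some d => g.insert col d
      | none => g)
    PySem.Dict.empty).items

-- ===== PRECONDITION & SPEC =====
def Spec_build_glossary_py (entities : List (String × List (String × List (String × String)))) (out : List (String × String)) : Prop := out = build_glossary_py_alt entities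
instance (entities : List (String × List (String × List (String × String)))) (out : List (String × String)) : Decidable (Spec_build_glossary_py entities out) := by unfold Spec_build_glossary_py; infer_instance

-- ===== CLAIM (what is proved, stated in full; the proofs are below) =====
def Claim_equal_build_glossary_py : Prop := ∀ (entities : List (String × List (String × List (String × String)))), Dom_build_glossary_py entities → Spec_build_glossary_py entities (build_glossary_py entities)

-- ===== LEMMAS AND PROOFS =====

-- 'first definition whose term is a substring of cl' (characterises both programs' match)
def pvFirstDef (cl : String) : List (String × String) → Option String
  | [] => none
  | (t, d) :: rest => if PySem.Str.isIn t cl then some d else pvFirstDef cl rest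

theorem pvMatchLoop_eq (ts : List (String × String)) (g : PySem.Dict String String) (col cl : String) :
    pvMatchLoop g col cl ts =
      match pvFirstDef cl ts with
      | some d => g.insert col d
      | none => g := by
  induction ts with
  | nil => rfl
  | cons p rest ih =>
    obtain ⟨t, d⟩ := p
    simp only [pvMatchLoop, pvFirstDef]
    split_ifs <;> simp [ih]

-- B's inner sweep over the column set for one (term, definition) pair
def pvInner (t d : String) (m : PySem.Dict String String) (cols : List String) : PySem.Dict String String :=
  cols.foldl
    (fun m col => if PySem.Str.isIn t (PySem.Str.lower col) then m.setdefault col d else m) m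

theorem pvGet_setdefault (m : PySem.Dict String String) (k v : String) (c : String) :
    (m.setdefault k v).get? c =
      if c = k then some ((m.get? k).getD v) else m.get? c := by
  by_cases hc : m.contains k
  · rw [PySem.Dict.setdefault_of_contains _ _ hc]
    split_ifs with h
    · subst h
      rw [PySem.Dict.contains_eq_isSome_get?] at hc
      cases hk : m.get? c <;> simp [hk] at hc ⊢
    · rfl
  · rw [PySem.Dict.setdefault_of_not_contains _ _ (by simpa using hc)]
    rw [PySem.Dict.get?_insert]
    split_ifs with h
    · subst h
      rw [PySem.Dict.contains_eq_isSome_get?] at hc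
      cases hk : m.get? c <;> simp [hk] at hc ⊢
    · rfl

theorem pvInner_get (t d : String) (cols : List String) :
    ∀ (m : PySem.Dict String String) (c : String),
      (pvInner t d m cols).get? c =
        if c ∈ cols ∧ PySem.Str.isIn t (PySem.Str.lower c) then some ((m.get? c).getD d)
        else m.get? c := by
  induction cols with
  | nil => intro m c; simp [pvInner]
  | cons col rest ih =>
    intro m c
    simp only [pvInner, List.foldl_cons] at *
    rw [ih]
    by_cases hcc : c = col
    · subst hcc
      by_cases hin : PySem.Str.isIn t (PySem.Str.lower c)
      · simp only [hin, if_true, pvGet_setdefault]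
        simp only [PySem.Str.isIn, PySem.Str.toList_lower] at hin
        by_cases hr : c ∈ rest <;> simp [hr]
      · have hin' := hin; simp only [PySem.Str.isIn, PySem.Str.toList_lower] at hin'
        simp [hin']
    · have hstep :
          (if PySem.Str.isIn t (PySem.Str.lower col) then m.setdefault col d else m).get? c
            = m.get? c := by
        split_ifs with h
        · rw [pvGet_setdefault]; simp [hcc]
        · rfl
      rw [hstep]
      by_cases hr : c ∈ rest <;> simp [hr, hcc]

-- B's outer term-major fold, characterised pointwise
theorem pvOuter_get (cols : List String) (ts : List (String × String)) :
    ∀ (m : PySem.Dict String String) (c : String),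
      (ts.foldl (fun m td => pvInner td.1 td.2 m cols) m).get? c =
        if c ∈ cols then (m.get? c).or (pvFirstDef (PySem.Str.lower c) ts)
        else m.get? c := by
  induction ts with
  | nil =>
    intro m c
    by_cases hc : c ∈ cols <;> simp [pvFirstDef, hc, Option.or]
    cases m.get? c <;> rfl
  | cons td rest ih =>
    intro m c
    obtain ⟨t, d⟩ := td
    simp only [List.foldl_cons]
    rw [ih, pvInner_get]
    by_cases hc : c ∈ cols
    · by_cases hin : PySem.Str.isIn t (PySem.Str.lower c)
      · simp only [hc, hin, and_self, if_true, pvFirstDef]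
        cases m.get? c <;> rfl
      · have hin' := hin; simp only [PySem.Str.isIn, PySem.Str.toList_lower] at hin'
        simp [hc, hin', pvFirstDef]
    · simp [hc]

-- the two final per-column steps agree once matched.get? is pvFirstDef
theorem pv_final_fold (matched : PySem.Dict String String) (cols : List String)
    (h : ∀ c ∈ cols, matched.get? c = pvFirstDef (PySem.Str.lower c) pvTermDefs) :
    ∀ g : PySem.Dict String String,
      cols.foldl
        (fun g col =>
          match matched.get? col with
          | some d => g.insert col d
          | none => g) g
      = cols.foldl (fun g col => pvMatchLoop g col (PySem.Str.lower col) pvTermDefs) g := by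
  induction cols with
  | nil => intro g; rfl
  | cons col rest ih =>
    intro g
    simp only [List.foldl_cons]
    rw [h col List.mem_cons_self, pvMatchLoop_eq,
      ih (fun c hc => h c (List.mem_cons_of_mem _ hc))]

-- ===== VERDICT (by name: the statement is the Claim_ definition above) =====
theorem build_glossary_py_spec : Claim_equal_build_glossary_py := by
  intro entities _
  unfold Spec_build_glossary_py build_glossary_py build_glossary_py_alt
  dsimp only
  set all_cols : PySem.Set String :=
    (PySem.Dict.ofList entities).values.foldl
      (fun s entity =>
        PySem.Set.update s (PySem.Dict.ofList ((PySem.Dict.ofList entity).getD "attributes" [])).keys)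
      PySem.Set.empty with hcols
  have hmatched : ∀ c ∈ all_cols,
      (pvTermDefs.foldl
        (fun matched td =>
          all_cols.foldl
            (fun matched col =>
              if PySem.Str.isIn td.1 (PySem.Str.lower col) then matched.setdefault col td.2
              else matched)
            matched)
        PySem.Dict.empty).get? c = pvFirstDef (PySem.Str.lower c) pvTermDefs := by
    intro c hc
    have := pvOuter_get all_cols pvTermDefs PySem.Dict.empty c
    simp only [pvInner] at this
    rw [this]
    simp [hc, PySem.Dict.get?_empty, Option.or]
  rw [← pv_final_fold _ all_cols hmatched PySem.Dict.empty]
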